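-- pv_equiv track=rewrite | github.com/gmyrzamuratov/silah | social_providers/twitter.py | find_punctuation
-- ===== SOURCE A (Python) =====
-- def find_punctuation(sequence):
-- 	'''
-- 	returns the end point closest to 137 with a punctuation in it
-- 	returns 0 if not found (ie a string with no punctuation in it at all
-- 	'''
-- 	punctuation = '.-,;'
-- 	if len(sequence) <= 137:
-- 		return len(sequence)
-- 	for end in range(136, 0, -1):
-- 		if sequence[end] in punctuation:
-- 			return end +1
--
-- 	return 0
-- ===== SOURCE B (Python) =====
-- def find_punctuation(sequence):
--     '''
--     returns the end point closest to 137 with a punctuation in it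
--     returns 0 if not found (ie a string with no punctuation in it at all
--     '''
--     if len(sequence) <= 137:
--         return len(sequence)
--     last = -1
--     for i, ch in enumerate(sequence[1:137], 1):
--         if ch in '.-,;':
--             last = i
--     return last + 1
-- ===== Notes on version B (the rewrite author's own statement) =====
-- stated objective: alternative
-- what changed: Replaces A's descending first-hit scan (range(136,0,-1) with early return) by a single forward pass over the window sequence[1:137] that keeps the last punctuation position in an accumulator initialised to -1, so the no-punctuation case yields 0.
import Mathlib
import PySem

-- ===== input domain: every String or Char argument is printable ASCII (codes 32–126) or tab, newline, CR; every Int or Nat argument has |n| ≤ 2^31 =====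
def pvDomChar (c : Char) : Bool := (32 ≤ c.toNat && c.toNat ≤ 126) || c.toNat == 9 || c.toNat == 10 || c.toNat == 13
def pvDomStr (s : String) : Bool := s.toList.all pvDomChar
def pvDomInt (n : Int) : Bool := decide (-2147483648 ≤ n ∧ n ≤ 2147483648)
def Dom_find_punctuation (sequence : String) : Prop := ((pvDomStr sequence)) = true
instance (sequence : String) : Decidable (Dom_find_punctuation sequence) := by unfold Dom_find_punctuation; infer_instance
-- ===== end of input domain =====

-- B replaces A's descending early-return scan with one forward pass keeping the last punctuation position (alternative decomposition, same cost).

-- ===== PORT A =====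
-- 'c in ".-,;"' for the single character c (exact: membership of a 1-char string)
def pvIsPunct (c : Char) : Bool := PySem.Chars.isIn [c] ".-,;".toList

-- the 'for end in range(136, 0, -1)' loop with its early return
def pvLoopA (cs : List Char) : List Int → Int
  | [] => 0
  | e :: rest =>
    match PySem.List.pyGet? cs e with
    | some c => if pvIsPunct c then e + 1 else pvLoopA cs rest
    | none => 0  -- unreachable: the length guard makes every index 1..136 in range

def find_punctuation (sequence : String) : Int :=
  if (PySem.Str.len sequence : Int) ≤ 137 then (PySem.Str.len sequence : Int)
  else pvLoopA sequence.toList (PySem.List.pyRange 136 0 (-1))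

-- ===== PORT B =====
def find_punctuation_alt (sequence : String) : Int :=
  if (PySem.Str.len sequence : Int) ≤ 137 then (PySem.Str.len sequence : Int)
  else
    let window := PySem.Str.slice sequence (some 1) (some 137)
    let last := (PySem.List.enumerate window.toList 1).foldl
      (fun last p => if pvIsPunct p.2 then p.1 else last) (-1 : Int)
    last + 1

-- ===== PRECONDITION & SPEC =====
def Spec_find_punctuation (sequence : String) (out : Int) : Prop := out = find_punctuation_alt sequence
instance (sequence : String) (out : Int) : Decidable (Spec_find_punctuation sequence out) := by unfold Spec_find_punctuation; infer_instance

-- ===== CLAIM (what is proved, stated in full; the proofs are below) =====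
def Claim_equal_find_punctuation : Prop := ∀ (sequence : String), Dom_find_punctuation sequence → Spec_find_punctuation sequence (find_punctuation sequence)

-- ===== LEMMAS AND PROOFS =====

-- A's countdown first-hit over indices m..1 equals B's forward last-hit fold over the first m window chars, shifted by 1.
lemma pv_key (cs : List Char) (h : 138 ≤ cs.length) :
    ∀ m : Nat, m ≤ 136 →
    pvLoopA cs (PySem.List.pyRange (m : Int) 0 (-1)) =
      (PySem.List.enumerate ((cs.drop 1).take m) 1).foldl
        (fun last p => if pvIsPunct p.2 then p.1 else last) (-1 : Int) + 1 := by
  intro m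
  induction m with
  | zero =>
    intro _
    rw [PySem.List.pyRange_neg_one_eq_nil (by norm_num)]
    simp [pvLoopA]
  | succ m ih =>
    intro hm
    have hm' : m ≤ 136 := Nat.le_of_succ_le hm
    have hlt : m + 1 < cs.length := by omega
    have hcons : PySem.List.pyRange ((m + 1 : Nat) : Int) 0 (-1)
        = ((m + 1 : Nat) : Int) :: PySem.List.pyRange (((m + 1 : Nat) : Int) - 1) 0 (-1) :=
      PySem.List.pyRange_neg_one_cons (by exact_mod_cast Nat.succ_pos m)
    have hstep : (((m + 1 : Nat) : Int) - 1) = (m : Int) := by push_cast; ring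
    rw [hcons, hstep]
    have hget : PySem.List.pyGet? cs ((m + 1 : Nat) : Int) = some cs[m + 1] := by
      rw [PySem.List.pyGet?_natCast]
      exact List.getElem?_eq_getElem hlt
    have hmlt : m < (cs.drop 1).length := by
      rw [List.length_drop]; omega
    have htake : (cs.drop 1).take (m + 1)
        = (cs.drop 1).take m ++ [(cs.drop 1)[m]] := by
      rw [List.take_add_one, List.getElem?_eq_getElem hmlt]
      simp
    have hw : (cs.drop 1)[m] = cs[m + 1] := by
      rw [List.getElem_drop]
      congr 1
      omega
    rw [htake, hw, PySem.List.enumerate_append, List.foldl_append]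
    have hlen : ((cs.drop 1).take m).length = m := by
      simp [List.length_take]; omega
    rw [hlen]
    simp only [PySem.List.enumerate, pvLoopA, hget]
    by_cases hp : pvIsPunct cs[m + 1]
    · simp [hp]
      omega
    · simp [hp]
      simpa using ih hm'

-- ===== VERDICT (by name: the statement is the Claim_ definition above) =====
theorem find_punctuation_spec : Claim_equal_find_punctuation := by
  intro s _
  unfold Spec_find_punctuation find_punctuation find_punctuation_alt
  simp only [PySem.Str.len_eq, PySem.Str.toList_slice]
  by_cases h : ((s.toList.length : Int)) ≤ 137
  · have h' : s.length ≤ 137 := by simp at h; exact_mod_cast h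
    simp [h']
  · rw [if_neg h, if_neg h]
    have hlen : 138 ≤ s.toList.length := by omega
    rw [PySem.Chars.slice_eq_listSlice]
    have hwin : PySem.List.slice s.toList (some 1) (some 137)
        = (s.toList.drop 1).take 136 := by
      have := PySem.List.slice_natCast s.toList 1 137
      simpa using this
    rw [hwin]
    simpa using pv_key s.toList hlen 136 (by norm_num)
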